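-- pv_equiv track=rewrite | github.com/SquirtlesAlgorithmStudy/SquirtlesAlgorithmStudyS8 | 의진/240716_힙_그리디_구현/1502_물병_find_one_and_idx.py | find_one_and_idx
-- ===== SOURCE A (Python) =====
-- def find_one_and_idx(n):
--     one_count = 0
--     idx_cnt = 0
--     first_one_idx = -1
--     while n != 0:
--         if n % 2 == 1:
--             one_count += 1
--             if first_one_idx == -1:
--                 first_one_idx = idx_cnt
--         n //= 2
--         idx_cnt += 1
--     return one_count, first_one_idx
-- ===== SOURCE B (Python) =====
-- def find_one_and_idx(n):
--     s = bin(n)[2:]  # binary digits of n, most significant first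
--     one_count = s.count('1')
--     first_one_idx = len(s) - 1 - s.rindex('1') if one_count else -1
--     return one_count, first_one_idx
-- ===== Notes on version B (the rewrite author's own statement) =====
-- stated objective: idiomatic
-- what changed: Replaces the digit-by-digit while-loop with three accumulators by one bin(n) conversion plus str.count/str.rindex on the digit string; equivalence is claimed on n >= 0 (Pre_), since A loops forever on negative n.
import Mathlib
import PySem

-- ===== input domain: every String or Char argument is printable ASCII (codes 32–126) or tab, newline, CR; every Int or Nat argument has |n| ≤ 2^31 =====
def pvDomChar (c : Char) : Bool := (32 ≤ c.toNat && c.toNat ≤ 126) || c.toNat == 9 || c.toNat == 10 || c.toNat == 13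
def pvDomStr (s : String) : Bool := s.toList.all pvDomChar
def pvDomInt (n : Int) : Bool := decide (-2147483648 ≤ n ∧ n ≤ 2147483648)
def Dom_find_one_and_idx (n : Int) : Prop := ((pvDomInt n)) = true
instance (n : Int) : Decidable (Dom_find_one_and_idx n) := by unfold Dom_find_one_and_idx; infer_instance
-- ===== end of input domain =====

-- B computes popcount and the lowest-set-bit index from the binary digit string (bin(n)) with
-- count/rindex instead of A's digit-by-digit while-loop; equivalence is on n ≥ 0 (A never
-- terminates on n < 0, which Pre_ excludes).


-- ===== PORT A =====
-- Python's 'while n != 0' loop with its three accumulators. The guard is written '0 < n' only to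
-- make the recursion total in Lean: for n < 0 the Python loop never terminates (n //= 2 stays
-- negative), and those inputs are excluded by Pre_ below.
def findLoopA (n one_count idx_cnt first_one_idx : Int) : Int × Int :=
  if h : 0 < n then
    let p : Int × Int :=
      if PySem.Int.mod n 2 = 1 then
        (one_count + 1, if first_one_idx = -1 then idx_cnt else first_one_idx)
      else (one_count, first_one_idx)
    findLoopA (PySem.Int.floordiv n 2) p.1 (idx_cnt + 1) p.2
  else (one_count, first_one_idx)
termination_by n.toNat
decreasing_by
  rw [PySem.Int.floordiv_eq_ediv_of_pos (by omega)]
  omega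

def find_one_and_idx (n : Int) : Int × Int := findLoopA n 0 0 (-1)

-- ===== PORT B =====
-- bin(n)[2:] is ported as the list of binary digits of n: Python's string is most-significant-digit
-- first, i.e. (Nat.digits 2 n.toNat).reverse (exact for n ≥ 0, the precondition; for n = 0 the
-- Python string is "0" while the digit list is [] — both have count('1') = 0, and the rindex branch
-- is not taken, so the result is unaffected).
-- s.rindex('1'), the index of the last occurrence, ported as length - 1 - (index in the reverse):
def rindexDigit (s : List Nat) (d : Nat) : Int :=
  (s.length : Int) - 1 - (s.reverse.idxOf d : Int)

def find_one_and_idx_alt (n : Int) : Int × Int :=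
  let s : List Nat := (Nat.digits 2 n.toNat).reverse
  let one_count : Int := (s.count 1 : Int)
  let first_one_idx : Int :=
    if one_count ≠ 0 then (s.length : Int) - 1 - rindexDigit s 1 else -1
  (one_count, first_one_idx)

-- ===== PRECONDITION & SPEC =====
-- Pre_ excludes exactly n < 0: there Python A's while-loop diverges (returns nothing).
def Pre_find_one_and_idx (n : Int) : Prop := 0 ≤ n
instance (n : Int) : Decidable (Pre_find_one_and_idx n) := by unfold Pre_find_one_and_idx; infer_instance
def pvWitness_find_one_and_idx : Int := (12)

def Spec_find_one_and_idx (n : Int) (out : Int × Int) : Prop := out = find_one_and_idx_alt n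
instance (n : Int) (out : Int × Int) : Decidable (Spec_find_one_and_idx n out) := by unfold Spec_find_one_and_idx; infer_instance

-- ===== CLAIM (what is proved, stated in full; the proofs are below) =====
def Claim_equal_find_one_and_idx : Prop := ∀ (n : Int), Dom_find_one_and_idx n → Pre_find_one_and_idx n → Spec_find_one_and_idx n (find_one_and_idx n)

-- ===== LEMMAS AND PROOFS =====

-- one unfolding step of the A-loop on a positive argument
theorem findLoopA_pos (n one_count idx_cnt first_one_idx : Int) (h : 0 < n) :
    findLoopA n one_count idx_cnt first_one_idx =
      (let p : Int × Int :=
        if PySem.Int.mod n 2 = 1 then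
          (one_count + 1, if first_one_idx = -1 then idx_cnt else first_one_idx)
        else (one_count, first_one_idx)
      findLoopA (PySem.Int.floordiv n 2) p.1 (idx_cnt + 1) p.2) := by
  rw [findLoopA]; simp [h]

theorem findLoopA_nonpos (n one_count idx_cnt first_one_idx : Int) (h : ¬ 0 < n) :
    findLoopA n one_count idx_cnt first_one_idx = (one_count, first_one_idx) := by
  rw [findLoopA]; simp [h]

-- the A-loop on the cast of a natural number, characterised by Nat.digits 2: the first component
-- adds the number of 1-digits; the second keeps first_one_idx once set (≠ -1), and otherwise
-- becomes idx_cnt plus the position of the first 1-digit (little-endian)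
theorem findLoopA_digits (m : Nat) : ∀ (oc ic f : Int), 0 ≤ ic →
    (f ≠ -1 → findLoopA (m : Int) oc ic f = (oc + ((Nat.digits 2 m).count 1 : Int), f)) ∧
    findLoopA (m : Int) oc ic (-1) =
      (oc + ((Nat.digits 2 m).count 1 : Int),
       if m = 0 then -1 else ic + ((Nat.digits 2 m).idxOf 1 : Int)) := by
  induction m using Nat.strong_induction_on with
  | _ m ih =>
    intro oc ic f hic
    by_cases hm : m = 0
    · subst hm
      refine ⟨fun _ => ?_, ?_⟩ <;>
        · rw [show (((0:Nat)):Int) = 0 by norm_num, findLoopA_nonpos _ _ _ _ (by norm_num)]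
          simp
    · have hpos : (0:Int) < (m : Int) := by exact_mod_cast Nat.pos_of_ne_zero hm
      have hmod : PySem.Int.mod (m : Int) 2 = ((m % 2 : Nat) : Int) :=
        PySem.Int.mod_natCast m 2
      have hdiv : PySem.Int.floordiv (m : Int) 2 = ((m / 2 : Nat) : Int) :=
        PySem.Int.floordiv_natCast m 2
      have hdig : Nat.digits 2 m = m % 2 :: Nat.digits 2 (m / 2) :=
        Nat.digits_def' (by norm_num) (Nat.pos_of_ne_zero hm)
      have hlt : m / 2 < m := Nat.div_lt_self (Nat.pos_of_ne_zero hm) (by norm_num)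
      rcases Nat.mod_two_eq_zero_or_one m with h2 | h2
      -- even digit
      · have hmodne : ¬ PySem.Int.mod (m : Int) 2 = 1 := by rw [hmod, h2]; norm_num
        constructor
        · intro hf
          rw [findLoopA_pos _ _ _ _ hpos]
          simp only [hmodne, if_false, hdiv]
          rw [((ih (m / 2) hlt) oc (ic + 1) f (by omega)).1 hf]
          rw [hdig]
          simp [h2]
        · rw [findLoopA_pos _ _ _ _ hpos]
          simp only [hmodne, if_false, hdiv]
          rw [((ih (m / 2) hlt) oc (ic + 1) (-1) (by omega)).2]
          rw [hdig, h2]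
          have : ¬ m / 2 = 0 := by omega
          simp [this, hm]
          ring
      -- odd digit
      · have hmodeq : PySem.Int.mod (m : Int) 2 = 1 := by rw [hmod, h2]; norm_num
        constructor
        · intro hf
          rw [findLoopA_pos _ _ _ _ hpos]
          simp only [hmodeq, if_true, hdiv, if_neg hf]
          rw [((ih (m / 2) hlt) (oc + 1) (ic + 1) f (by omega)).1 hf]
          rw [hdig, h2]
          simp
          ring
        · rw [findLoopA_pos _ _ _ _ hpos]
          have hicne : ic ≠ -1 := by omega
          simp only [hmodeq, if_true, hdiv]
          rw [((ih (m / 2) hlt) (oc + 1) (ic + 1) ic (by omega)).1 hicne]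
          rw [hdig, h2]
          simp [hm]
          ring

-- for m > 0 the binary digit list contains a 1
theorem one_mem_digits_two (m : Nat) (hm : 0 < m) : 1 ∈ Nat.digits 2 m := by
  induction m using Nat.strong_induction_on with
  | _ m ih =>
    rw [Nat.digits_def' (by norm_num) hm]
    rcases Nat.mod_two_eq_zero_or_one m with h | h
    · have h2 : 0 < m / 2 := Nat.div_pos (by omega) (by norm_num)
      exact List.mem_cons_of_mem _ (ih (m / 2) (by omega) h2)
    · rw [h]; exact List.mem_cons_self

theorem final_nat (m : Nat) : find_one_and_idx (m : Int) = find_one_and_idx_alt (m : Int) := by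
  unfold find_one_and_idx find_one_and_idx_alt
  rw [(findLoopA_digits m 0 0 (-1) le_rfl).2]
  simp only [Int.toNat_natCast, List.count_reverse, List.reverse_reverse, rindexDigit,
    List.length_reverse]
  by_cases h0 : m = 0
  · simp [h0]
  · have hcnt : (Nat.digits 2 m).count 1 ≠ 0 :=
      (List.count_pos_iff.mpr (one_mem_digits_two _ (Nat.pos_of_ne_zero h0))).ne'
    simp [h0, hcnt]

-- ===== VERDICT (by name: the statement is the Claim_ definition above) =====
theorem find_one_and_idx_spec : Claim_equal_find_one_and_idx := by
  intro n _ hpre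
  unfold Spec_find_one_and_idx
  have hn : ((n.toNat : Nat) : Int) = n := Int.toNat_of_nonneg hpre
  rw [← hn]
  exact final_nat n.toNat
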